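-- pv_equiv track=rewrite | github.com/igorvanloo/Project-Euler-Explained | Finished Problems/pe00714 - Duodigits.py | genDuoDigits
-- ===== SOURCE A (Python) =====
-- def genDuoDigits(d, x, y):
--     duodigits = set()
--     combs = {0}
--
--     for _ in range(d):
--         temp = []
--         for v in combs:
--             for z in [x, y]:
--                 t = v*10 + z
--                 if t != 0:
--                     temp.append(t)
--                     duodigits.add(t)
--         combs = temp
--
--     return duodigits
-- ===== SOURCE B (Python) =====
-- def genDuoDigits(d, x, y):
--     def level(k):
--         vals = [0]
--         for _ in range(k):
--             vals = [v * 10 + z for v in vals for z in (x, y) if v * 10 + z != 0]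
--         return vals
--
--     res = set()
--     for length in range(1, d + 1):
--         res.update(level(length))
--     return res
-- ===== Notes on version B (the rewrite author's own statement) =====
-- stated objective: alternative
-- what changed: Replaces A's incrementally maintained frontier list (threaded through the outer loop with the result set filled inline) by a pure helper that recomputes the length-k frontier from scratch for each k, and unions these independent per-length enumerations into the result set.
import Mathlib
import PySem

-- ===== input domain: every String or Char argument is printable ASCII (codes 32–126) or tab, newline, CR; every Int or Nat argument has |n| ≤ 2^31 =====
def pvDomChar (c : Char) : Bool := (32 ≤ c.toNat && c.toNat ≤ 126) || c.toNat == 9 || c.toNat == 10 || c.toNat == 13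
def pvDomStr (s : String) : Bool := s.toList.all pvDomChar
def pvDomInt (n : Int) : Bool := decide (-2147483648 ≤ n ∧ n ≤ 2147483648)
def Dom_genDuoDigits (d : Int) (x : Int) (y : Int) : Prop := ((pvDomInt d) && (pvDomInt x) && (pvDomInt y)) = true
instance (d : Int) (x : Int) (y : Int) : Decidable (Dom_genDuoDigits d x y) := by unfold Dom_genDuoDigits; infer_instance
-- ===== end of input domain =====

-- B replaces A's incrementally maintained frontier (one `combs` list threaded through the
-- outer loop, with the result set filled inline) by an independent per-length enumeration:
-- a pure helper recomputes the length-k frontier from scratch and the result set is the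
-- union over the lengths 1..d (objective: alternative; similar cost).

-- ===== PORT A =====
-- Python's `combs = {0}` is a one-element set; its iteration order is the singleton [0].
def genDuoDigits (d : Int) (x : Int) (y : Int) : List Int :=
  (((PySem.List.pyRange 0 d 1).foldl
    (fun (st : PySem.Set Int × List Int) _ =>
      st.2.foldl
        (fun (st2 : PySem.Set Int × List Int) v =>
          [x, y].foldl
            (fun (st3 : PySem.Set Int × List Int) z =>
              let t := v * 10 + z
              if t ≠ 0 then (PySem.Set.add st3.1 t, st3.2 ++ [t]) else st3)
            st2)
        (st.1, []))
    (PySem.Set.empty, [0])) : PySem.Set Int × List Int).1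

-- ===== PORT B =====
-- the inner helper `level(k)` of Source B (its caller passes k from range(1, d+1))
def levelAlt (x : Int) (y : Int) (k : Int) : List Int :=
  (PySem.List.pyRange 0 k 1).foldl
    (fun vals _ =>
      vals.flatMap (fun v =>
        [x, y].filterMap (fun z => if v * 10 + z ≠ 0 then some (v * 10 + z) else none)))
    [0]

def genDuoDigits_alt (d : Int) (x : Int) (y : Int) : List Int :=
  (PySem.List.pyRange 1 (d + 1) 1).foldl
    (fun res L => PySem.Set.update res (levelAlt x y L))
    PySem.Set.empty

-- ===== PRECONDITION & SPEC =====
def Spec_genDuoDigits (d : Int) (x : Int) (y : Int) (out : List Int) : Prop := out = genDuoDigits_alt d x y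
instance (d : Int) (x : Int) (y : Int) (out : List Int) : Decidable (Spec_genDuoDigits d x y out) := by unfold Spec_genDuoDigits; infer_instance

-- ===== CLAIM (what is proved, stated in full; the proofs are below) =====
def Claim_equal_genDuoDigits : Prop := ∀ (d : Int) (x : Int) (y : Int), Dom_genDuoDigits d x y → Spec_genDuoDigits d x y (genDuoDigits d x y)

-- ===== LEMMAS AND PROOFS =====

-- one frontier step, shared by both characterisations
def stepDuo (x y : Int) (vals : List Int) : List Int :=
  vals.flatMap (fun v =>
    [x, y].filterMap (fun z => if v * 10 + z ≠ 0 then some (v * 10 + z) else none))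

-- A's outer-loop body, named (definitionally equal to the inline lambda of the port)
def stepDuoOuter (x y : Int) (st : PySem.Set Int × List Int) : PySem.Set Int × List Int :=
  st.2.foldl
    (fun (st2 : PySem.Set Int × List Int) v =>
      [x, y].foldl
        (fun (st3 : PySem.Set Int × List Int) z =>
          let t := v * 10 + z
          if t ≠ 0 then (PySem.Set.add st3.1 t, st3.2 ++ [t]) else st3)
        st2)
    (st.1, [])

-- the length-n frontier, as a recursion on n
def levN (x y : Int) : Nat → List Int
  | 0 => [0]
  | n + 1 => stepDuo x y (levN x y n)

-- a fold whose body ignores the list elements is an iterate of the body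
theorem foldl_const_iterate {α β : Type} (F : β → β) (l : List α) (init : β) :
    l.foldl (fun s _ => F s) init = F^[l.length] init := by
  induction l generalizing init with
  | nil => rfl
  | cons a l ih => simp [List.foldl, ih, Function.iterate_succ_apply]

theorem levN_eq_iterate (x y : Int) (n : Nat) :
    levN x y n = (stepDuo x y)^[n] [0] := by
  induction n with
  | zero => rfl
  | succ n ih => simp [levN, ih, Function.iterate_succ_apply']

-- B's helper computes levN
theorem levelAlt_eq (x y : Int) (k : Int) :
    levelAlt x y k = levN x y k.toNat := by
  unfold levelAlt
  rw [PySem.List.pyRange_one,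
      show (fun (vals : List Int) (_ : Int) =>
        vals.flatMap (fun v =>
          [x, y].filterMap (fun z => if v * 10 + z ≠ 0 then some (v * 10 + z) else none)))
        = (fun vals _ => stepDuo x y vals) from rfl,
      List.foldl_map, foldl_const_iterate (stepDuo x y), levN_eq_iterate]
  simp

-- A's inner double loop over the frontier = update the set with stepDuo, append stepDuo
theorem innerA_eq (x y : Int) (combs : List Int) (duo : PySem.Set Int) (acc : List Int) :
    combs.foldl
        (fun (st2 : PySem.Set Int × List Int) v =>
          [x, y].foldl
            (fun (st3 : PySem.Set Int × List Int) z =>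
              let t := v * 10 + z
              if t ≠ 0 then (PySem.Set.add st3.1 t, st3.2 ++ [t]) else st3)
            st2)
        (duo, acc)
      = (PySem.Set.update duo (stepDuo x y combs), acc ++ stepDuo x y combs) := by
  induction combs generalizing duo acc with
  | nil => simp [stepDuo, PySem.Set.update]
  | cons v rest ih =>
    rw [List.foldl_cons]
    have hv : ([x, y].foldl
        (fun (st3 : PySem.Set Int × List Int) z =>
          let t := v * 10 + z
          if t ≠ 0 then (PySem.Set.add st3.1 t, st3.2 ++ [t]) else st3)
        (duo, acc))
        = (PySem.Set.update duo
             ([x, y].filterMap (fun z => if v * 10 + z ≠ 0 then some (v * 10 + z) else none)),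
           acc ++ [x, y].filterMap (fun z => if v * 10 + z ≠ 0 then some (v * 10 + z) else none)) := by
      simp only [List.foldl_cons, List.foldl_nil]
      split_ifs with h1 h2 h2 <;> simp [PySem.Set.update, h1, h2]
    rw [hv, ih]
    simp [stepDuo, PySem.Set.update, List.foldl_append]

-- A's outer loop after n iterations: the set so far, and the current frontier
theorem outerA_eq (x y : Int) (n : Nat) :
    (stepDuoOuter x y)^[n] ((PySem.Set.empty, [0]) : PySem.Set Int × List Int)
      = ((List.range n).foldl (fun res L => PySem.Set.update res (levN x y (L + 1)))
           PySem.Set.empty,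
         levN x y n) := by
  induction n with
  | zero => rfl
  | succ n ih =>
    rw [Function.iterate_succ_apply', ih]
    unfold stepDuoOuter
    rw [innerA_eq]
    simp [List.range_succ, levN]

-- ===== VERDICT (by name: the statement is the Claim_ definition above) =====
theorem genDuoDigits_spec : Claim_equal_genDuoDigits := by
  intro d x y _
  unfold Spec_genDuoDigits
  unfold genDuoDigits genDuoDigits_alt
  rw [show (fun (st : PySem.Set Int × List Int) (_ : Int) =>
        st.2.foldl
          (fun (st2 : PySem.Set Int × List Int) v =>
            [x, y].foldl
              (fun (st3 : PySem.Set Int × List Int) z =>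
                let t := v * 10 + z
                if t ≠ 0 then (PySem.Set.add st3.1 t, st3.2 ++ [t]) else st3)
              st2)
          (st.1, []))
      = (fun st _ => stepDuoOuter x y st) from rfl]
  rw [PySem.List.pyRange_one 0 d, List.foldl_map, foldl_const_iterate (stepDuoOuter x y),
      PySem.List.pyRange_one 1 (d + 1), List.foldl_map]
  simp only [List.length_range, outerA_eq]
  have hk : ∀ (L : Nat), levelAlt x y (1 + (L : Int)) = levN x y (L + 1) := by
    intro L
    rw [levelAlt_eq]
    congr 1
    omega
  simp only [hk]
  norm_num
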